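-- pv_equiv track=rewrite | github.com/harel-coffee/Ascending_neuron_screen_analysis_pipeline-auto | scripts_for_public/Fig10b_left-Plot_dFF_per_PE.py | restructure_into_evtOrder
-- ===== SOURCE A (Python) =====
-- def restructure_into_evtOrder(list_rcrdOrder):
--
-- 	evts_count_list=[]
-- 	for i, evts in enumerate(list_rcrdOrder):
-- 		evts_count_list.append(len(evts))
-- 	len_list_evtOrder=max(evts_count_list)
--
-- 	list_evtOrder=[]
-- 	for i in range(0,len_list_evtOrder):
-- 		list_evtOrder.append([])
-- 		for j, evts in enumerate(list_rcrdOrder):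
-- 			if i<len(evts):
-- 				list_evtOrder[i].append(evts[i])
--
--
-- 	return list_evtOrder
-- ===== SOURCE B (Python) =====
-- def restructure_into_evtOrder(list_rcrdOrder):
--     n = max(len(evts) for evts in list_rcrdOrder)
--     result = [[] for _ in range(n)]
--     for evts in list_rcrdOrder:
--         for i, e in enumerate(evts):
--             result[i].append(e)
--     return result
-- ===== Notes on version B (the rewrite author's own statement) =====
-- stated objective: simpler
-- what changed: B pre-allocates max-length buckets and scatters each record's elements into their position-bucket in one pass with enumerate, instead of A's column-by-column gather that rescans every record for each index with an i<len(evts) guard.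
import Mathlib
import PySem

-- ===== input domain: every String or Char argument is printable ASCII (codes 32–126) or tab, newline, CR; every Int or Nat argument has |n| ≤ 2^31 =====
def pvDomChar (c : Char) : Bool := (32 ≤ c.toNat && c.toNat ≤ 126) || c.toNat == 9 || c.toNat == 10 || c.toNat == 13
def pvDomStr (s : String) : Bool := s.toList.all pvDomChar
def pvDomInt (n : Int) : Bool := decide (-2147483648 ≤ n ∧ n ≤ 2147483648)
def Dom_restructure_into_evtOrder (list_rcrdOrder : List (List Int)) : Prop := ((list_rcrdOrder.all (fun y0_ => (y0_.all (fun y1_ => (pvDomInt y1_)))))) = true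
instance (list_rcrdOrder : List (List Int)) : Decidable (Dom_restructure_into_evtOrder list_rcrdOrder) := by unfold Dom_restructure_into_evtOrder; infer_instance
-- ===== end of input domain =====

-- B scatters each record's elements into pre-built position buckets in one pass (enumerate),
-- instead of A's per-column gather that rescans every record with an i < len guard; objective: simpler.


-- ===== PORT A =====
def restructure_into_evtOrder (list_rcrdOrder : List (List Int)) : List (List Int) :=
  -- evts_count_list = []; for evts in list: evts_count_list.append(len(evts)); len_list_evtOrder = max(...)
  -- (max() raises ValueError on an empty list; excluded by Pre_)
  match PySem.List.max? (list_rcrdOrder.foldl (fun acc evts => acc ++ [evts.length]) [])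
      (fun y => y) with
  | none => []
  | some n =>
    -- for i in range(n): append []; for evts in list: if i < len(evts): list_evtOrder[i].append(evts[i])
    (List.range n).foldl
      (fun acc i =>
        acc ++ [list_rcrdOrder.foldl
          (fun row evts => if i < evts.length then row ++ [evts.getD i 0] else row) []])
      []

-- ===== PORT B =====
-- 'for i, e in enumerate(evts): result[i].append(e)'
def pvScatter : List (List Int) → Nat → List Int → List (List Int)
  | res, _, [] => res
  | res, i, e :: rest => pvScatter (res.set i (res.getD i [] ++ [e])) (i + 1) rest

def restructure_into_evtOrder_alt (list_rcrdOrder : List (List Int)) : List (List Int) :=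
  match PySem.List.max? (list_rcrdOrder.map (fun evts => evts.length)) (fun y => y) with
  | none => []  -- max() raises ValueError; excluded by Pre_
  | some n =>
    list_rcrdOrder.foldl (fun res evts => pvScatter res 0 evts) (List.replicate n [])

-- ===== PRECONDITION & SPEC =====
-- Pre_ excludes only the empty outer list, on which both A's and B's max() raises ValueError.
def Pre_restructure_into_evtOrder (list_rcrdOrder : List (List Int)) : Prop :=
  list_rcrdOrder ≠ []
instance (list_rcrdOrder : List (List Int)) : Decidable (Pre_restructure_into_evtOrder list_rcrdOrder) := by
  unfold Pre_restructure_into_evtOrder; infer_instance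

def pvWitness_restructure_into_evtOrder : List (List Int) := [[1, 2], [3]]

def Spec_restructure_into_evtOrder (list_rcrdOrder : List (List Int)) (out : List (List Int)) : Prop := out = restructure_into_evtOrder_alt list_rcrdOrder
instance (list_rcrdOrder : List (List Int)) (out : List (List Int)) : Decidable (Spec_restructure_into_evtOrder list_rcrdOrder out) := by unfold Spec_restructure_into_evtOrder; infer_instance

-- ===== CLAIM (what is proved, stated in full; the proofs are below) =====
def Claim_equal_restructure_into_evtOrder : Prop := ∀ (list_rcrdOrder : List (List Int)), Dom_restructure_into_evtOrder list_rcrdOrder → Pre_restructure_into_evtOrder list_rcrdOrder → Spec_restructure_into_evtOrder list_rcrdOrder (restructure_into_evtOrder list_rcrdOrder)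

-- ===== LEMMAS AND PROOFS =====

theorem pvScatter_length (evts : List Int) (res : List (List Int)) (k : Nat) :
    (pvScatter res k evts).length = res.length := by
  induction evts generalizing res k with
  | nil => rfl
  | cons e rest ih => simp [pvScatter, ih]

theorem pvScatter_getD (evts : List Int) (res : List (List Int)) (k i : Nat)
    (h : k + evts.length ≤ res.length) :
    (pvScatter res k evts).getD i [] =
      if k ≤ i ∧ i < k + evts.length then res.getD i [] ++ [evts.getD (i - k) 0]
      else res.getD i [] := by
  induction evts generalizing res k with
  | nil => simp [pvScatter]
  | cons e rest ih =>
    have hk : k < res.length := by simp at h; omega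
    rw [pvScatter, ih _ _ (by simp at h ⊢; omega)]
    by_cases hik : i = k
    · subst hik
      rw [if_neg (by omega), if_pos ⟨le_refl i, by simp⟩]
      simp [List.getD, List.getElem?_set_self (by omega : i < res.length)]
    · have hset : (res.set k (res.getD k [] ++ [e])).getD i [] = res.getD i [] := by
        simp [List.getD, show ¬ (k = i) from fun hh => hik hh.symm]
      rw [hset]
      by_cases hin : k + 1 ≤ i ∧ i < k + 1 + rest.length
      · rw [if_pos hin, if_pos ⟨by omega, by simp; omega⟩]
        have h2 : i - k = (i - (k + 1)) + 1 := by omega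
        rw [h2, List.getD_cons_succ]
      · rw [if_neg hin, if_neg (by simp; omega)]

-- column i of the gather loop, in closed form
def pvCol (i : Nat) (l : List (List Int)) : List Int :=
  (l.filter (fun evts => decide (i < evts.length))).map (fun evts => evts.getD i 0)

theorem pvCol_cons (i : Nat) (e : List Int) (rest : List (List Int)) :
    pvCol i (e :: rest) =
      (if i < e.length then [e.getD i 0] else []) ++ pvCol i rest := by
  by_cases h : i < e.length <;> simp [pvCol, h]

theorem foldl_scatter_length (l : List (List Int)) (res : List (List Int)) :
    (l.foldl (fun r e => pvScatter r 0 e) res).length = res.length := by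
  induction l generalizing res with
  | nil => rfl
  | cons e rest ih => rw [List.foldl_cons, ih, pvScatter_length]

theorem foldl_scatter_getD (l : List (List Int)) (res : List (List Int)) (i : Nat)
    (h : ∀ evts ∈ l, evts.length ≤ res.length) :
    (l.foldl (fun r e => pvScatter r 0 e) res).getD i [] =
      res.getD i [] ++ pvCol i l := by
  induction l generalizing res with
  | nil => simp [pvCol]
  | cons e rest ih =>
    rw [List.foldl_cons, ih, pvScatter_getD, pvCol_cons]
    · by_cases hi : i < e.length
      · have : 0 ≤ i ∧ i < 0 + e.length := by omega
        simp [hi]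
      · have : ¬ (0 ≤ i ∧ i < 0 + e.length) := by omega
        simp [hi]
    · have := h e (by simp)
      omega
    · intro x hx
      rw [pvScatter_length]
      exact h x (by simp [hx])

-- A's result in closed form: one gather column per index of range n
theorem restructure_A_eq (l : List (List Int)) :
    restructure_into_evtOrder l =
      match PySem.List.max? (l.map (fun evts => evts.length)) (fun y => y) with
      | none => []
      | some n => (List.range n).map (fun i => pvCol i l) := by
  unfold restructure_into_evtOrder
  rw [PySem.List.foldl_append_singleton_eq_map (f := fun evts : List Int => evts.length),
    List.nil_append]
  cases PySem.List.max? (l.map (fun evts => evts.length)) (fun y => y) with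
  | none => rfl
  | some n =>
    simp only
    rw [PySem.List.foldl_append_singleton_eq_map, List.nil_append]
    apply List.map_congr_left
    intro i _
    rw [PySem.List.foldl_append_ite (p := fun evts : List Int => i < evts.length)
        (f := fun evts : List Int => evts.getD i 0), List.nil_append]
    rfl

theorem restructure_into_evtOrder_spec : Claim_equal_restructure_into_evtOrder := by
  intro l _ hpre
  unfold Spec_restructure_into_evtOrder restructure_into_evtOrder_alt
  rw [restructure_A_eq]
  cases hmax : PySem.List.max? (l.map (fun evts => evts.length)) (fun y => y) with
  | none =>
    exact absurd (by simpa using (PySem.List.max?_eq_none_iff _ _).mp hmax) hpre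
  | some n =>
    simp only
    have hbound : ∀ evts ∈ l, evts.length ≤ n := by
      intro evts hevts
      exact PySem.List.max?_isMax hmax _ (List.mem_map_of_mem hevts)
    have hlen : (l.foldl (fun r e => pvScatter r 0 e) (List.replicate n ([] : List Int))).length = n := by
      rw [foldl_scatter_length, List.length_replicate]
    apply List.ext_getElem
    · simp [hlen]
    · intro i h1 h2
      have hi : i < n := by simpa using h1
      have hgetD : (l.foldl (fun r e => pvScatter r 0 e) (List.replicate n ([] : List Int))).getD i []
          = pvCol i l := by
        rw [foldl_scatter_getD l _ i (by simpa [List.length_replicate] using hbound)]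
        simp [List.getD, hi]
      have hg := List.getD_eq_getElem (l.foldl (fun r e => pvScatter r 0 e) (List.replicate n ([] : List Int))) ([] : List Int) h2
      simp only [List.getElem_map, List.getElem_range, ← hg, hgetD]
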